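-- pv_equiv track=rewrite | github.com/Kronic90/Mimirs-Memory-Hub | playground/tts_backend.py | _unpack_snac
-- ===== SOURCE A (Python) =====
-- _SNAC_OFFSET = 128266
--
-- def _unpack_snac(snac_tokens: list[int]) -> list[list[int]]:
--     """Unpack 7-token SNAC frames → three hierarchical codec levels."""
--     frames = len(snac_tokens) // 7
--     snac_tokens = snac_tokens[: frames * 7]
--     l1, l2, l3 = [], [], []
--     for i in range(frames):
--         s = snac_tokens[i * 7 : (i + 1) * 7]
--         l1.append((s[0] - _SNAC_OFFSET) % 4096)
--         l2.extend([
--             (s[1] - _SNAC_OFFSET) % 4096,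
--             (s[4] - _SNAC_OFFSET) % 4096,
--         ])
--         l3.extend([
--             (s[2] - _SNAC_OFFSET) % 4096,
--             (s[3] - _SNAC_OFFSET) % 4096,
--             (s[5] - _SNAC_OFFSET) % 4096,
--             (s[6] - _SNAC_OFFSET) % 4096,
--         ])
--     return [l1, l2, l3]
-- ===== SOURCE B (Python) =====
-- _SNAC_OFFSET = 128266
--
--
-- def _unpack_snac(snac_tokens: list[int]) -> list[list[int]]:
--     """Unpack 7-token SNAC frames -> three hierarchical codec levels,
--     gathered column-wise by strided slices over a pre-normalized list."""
--     t = [(x - _SNAC_OFFSET) % 4096 for x in snac_tokens[: (len(snac_tokens) // 7) * 7]]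
--     l2 = [v for p in zip(t[1::7], t[4::7]) for v in p]
--     l3 = [v for q in zip(t[2::7], t[3::7], t[5::7], t[6::7]) for v in q]
--     return [t[0::7], l2, l3]
-- ===== Notes on version B (the rewrite author's own statement) =====
-- stated objective: alternative
-- what changed: Replaces A's row-wise per-frame loop (slice each 7-token frame, append to three accumulators) by column-wise gathers: normalize all kept tokens in one pass, then build each codec level from strided slices t[k::7] zipped and interleaved.
import Mathlib
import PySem

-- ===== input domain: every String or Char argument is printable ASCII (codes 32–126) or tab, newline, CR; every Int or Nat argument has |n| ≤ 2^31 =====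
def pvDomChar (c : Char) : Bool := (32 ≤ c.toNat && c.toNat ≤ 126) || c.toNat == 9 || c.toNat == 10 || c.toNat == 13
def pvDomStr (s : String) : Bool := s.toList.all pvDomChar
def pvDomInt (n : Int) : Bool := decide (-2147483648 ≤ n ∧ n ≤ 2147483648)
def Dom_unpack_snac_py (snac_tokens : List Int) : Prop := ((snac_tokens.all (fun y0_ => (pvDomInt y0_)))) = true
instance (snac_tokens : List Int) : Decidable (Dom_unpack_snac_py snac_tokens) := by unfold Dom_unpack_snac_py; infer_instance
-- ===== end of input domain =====

-- B replaces A's row-wise per-frame loop by column-wise strided gathers over a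
-- pre-normalized list (objective: alternative decomposition, same cost).

-- ===== PORT A =====
-- literal transliteration of A's per-frame loop (state = the three level lists)
def unpack_snac_py (snac_tokens : List Int) : List (List Int) :=
  let frames : Int := PySem.Int.floordiv (snac_tokens.length : Int) 7
  let toks := PySem.List.slice snac_tokens none (some (frames * 7))
  let res := (PySem.List.pyRange 0 frames).foldl
    (fun (st : List Int × List Int × List Int) i =>
      let s := PySem.List.slice toks (some (i * 7)) (some ((i + 1) * 7))
      (st.1 ++ [PySem.Int.mod (PySem.List.pyGetD s 0 0 - 128266) 4096],
       st.2.1 ++ [PySem.Int.mod (PySem.List.pyGetD s 1 0 - 128266) 4096,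
                  PySem.Int.mod (PySem.List.pyGetD s 4 0 - 128266) 4096],
       st.2.2 ++ [PySem.Int.mod (PySem.List.pyGetD s 2 0 - 128266) 4096,
                  PySem.Int.mod (PySem.List.pyGetD s 3 0 - 128266) 4096,
                  PySem.Int.mod (PySem.List.pyGetD s 5 0 - 128266) 4096,
                  PySem.Int.mod (PySem.List.pyGetD s 6 0 - 128266) 4096]))
    ([], [], [])
  [res.1, res.2.1, res.2.2]

-- ===== PORT B =====
-- hand port of the extended slice t[k::7] (exact for step 7 and a 0 ≤ start,
-- the only form Source B uses): take every 7th element, i.e. t[k::7] = stride7 (t.drop k)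
def stride7 : List Int → List Int
  | x :: rest => x :: stride7 (List.drop 6 rest)
  | [] => []
termination_by l => l.length
decreasing_by simp

def unpack_snac_py_alt (snac_tokens : List Int) : List (List Int) :=
  let t := (snac_tokens.take ((snac_tokens.length / 7) * 7)).map
    (fun x => PySem.Int.mod (x - 128266) 4096)
  let l2 := ((stride7 (t.drop 1)).zip (stride7 (t.drop 4))).flatMap
    (fun p => [p.1, p.2])
  let l3 := ((stride7 (t.drop 2)).zip ((stride7 (t.drop 3)).zip
      ((stride7 (t.drop 5)).zip (stride7 (t.drop 6))))).flatMap
    (fun q => [q.1, q.2.1, q.2.2.1, q.2.2.2])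
  [stride7 t, l2, l3]

-- ===== PRECONDITION & SPEC =====
def Spec_unpack_snac_py (snac_tokens : List Int) (out : List (List Int)) : Prop := out = unpack_snac_py_alt snac_tokens
instance (snac_tokens : List Int) (out : List (List Int)) : Decidable (Spec_unpack_snac_py snac_tokens out) := by unfold Spec_unpack_snac_py; infer_instance

-- ===== CLAIM (what is proved, stated in full; the proofs are below) =====
def Claim_equal_unpack_snac_py : Prop := ∀ (snac_tokens : List Int), Dom_unpack_snac_py snac_tokens → Spec_unpack_snac_py snac_tokens (unpack_snac_py snac_tokens)

-- ===== LEMMAS AND PROOFS =====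

theorem stride7_nil : stride7 [] = [] := by simp [stride7]
theorem stride7_cons (x : Int) (rest : List Int) :
    stride7 (x :: rest) = x :: stride7 (List.drop 6 rest) := by simp [stride7]

-- length of a 7-stride
theorem stride7_length : ∀ (n : Nat) (l : List Int), l.length = n →
    (stride7 l).length = (l.length + 6) / 7 := by
  intro n
  induction n using Nat.strong_induction_on with
  | _ n ih =>
    intro l hl
    cases l with
    | nil => simp [stride7_nil]
    | cons x rest =>
      rw [stride7_cons]
      have := ih (List.drop 6 rest).length (by simp at hl ⊢; omega) (List.drop 6 rest) rfl
      simp at this ⊢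
      rw [this]
      omega

-- chunk decomposition of a stride starting at j < 7: appending one whole
-- 7-frame w appends the stride of w
theorem stride7_chunk (j : Nat) (hj : j < 7) :
    ∀ (f : Nat) (t : List Int), t.length = 7 * f → ∀ (w : List Int),
      stride7 ((t ++ w).drop j) = stride7 (t.drop j) ++ stride7 (w.drop j) := by
  intro f
  induction f with
  | zero => intro t ht w; have : t = [] := List.eq_nil_of_length_eq_zero (by omega); simp [this, stride7_nil]
  | succ f ih =>
    intro t ht w
    rw [List.drop_append_of_le_length (by omega)]
    have hne : t.drop j ≠ [] := by
      intro h; have := congrArg List.length h; simp at this; omega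
    rcases hdj : t.drop j with _ | ⟨y, ys⟩
    · exact absurd hdj hne
    have hys : ys.length = 7 * f + 6 - j := by
      have := congrArg List.length hdj; simp at this; omega
    have hys6 : List.drop 6 ys = (t.drop 7).drop j := by
      have h1 : List.drop 6 ys = (t.drop j).drop 7 := by
        rw [hdj]; simp
      rw [h1, List.drop_drop, List.drop_drop, Nat.add_comm]
    have h3 : 6 - ys.length = j - (t.drop 7).length := by simp; omega
    have h2 : List.drop 6 (ys ++ w) = (t.drop 7 ++ w).drop j := by
      rw [List.drop_append, List.drop_append, hys6, h3]
    rw [show (y :: ys) ++ w = y :: (ys ++ w) from rfl, stride7_cons, stride7_cons,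
        h2, hys6, ih (t.drop 7) (by simp; omega) w, List.cons_append]

-- a list of length 7 is a literal 7-tuple
theorem exists_seven (c : List Int) (h : c.length = 7) :
    ∃ a b c3 d e f g, c = [a, b, c3, d, e, f, g] := by
  match c, h with
  | [a, b, c3, d, e, f, g], _ => exact ⟨a, b, c3, d, e, f, g, rfl⟩

-- abbreviations used only by the proofs
def pvN (x : Int) : Int := PySem.Int.mod (x - 128266) 4096

def pvStep (toks : List Int) (st : List Int × List Int × List Int) (i : Int) :
    List Int × List Int × List Int :=
  let s := PySem.List.slice toks (some (i * 7)) (some ((i + 1) * 7))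
  (st.1 ++ [pvN (PySem.List.pyGetD s 0 0)],
   st.2.1 ++ [pvN (PySem.List.pyGetD s 1 0), pvN (PySem.List.pyGetD s 4 0)],
   st.2.2 ++ [pvN (PySem.List.pyGetD s 2 0), pvN (PySem.List.pyGetD s 3 0),
              pvN (PySem.List.pyGetD s 5 0), pvN (PySem.List.pyGetD s 6 0)])

def pvL1 (t : List Int) : List Int := stride7 t
def pvL2 (t : List Int) : List Int :=
  ((stride7 (t.drop 1)).zip (stride7 (t.drop 4))).flatMap (fun p => [p.1, p.2])
def pvL3 (t : List Int) : List Int :=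
  ((stride7 (t.drop 2)).zip ((stride7 (t.drop 3)).zip
      ((stride7 (t.drop 5)).zip (stride7 (t.drop 6))))).flatMap
    (fun q => [q.1, q.2.1, q.2.2.1, q.2.2.2])

theorem stride7_drop_length (t : List Int) (f j : Nat) (ht : t.length = 7 * f)
    (hj : 1 ≤ j) (hj7 : j ≤ 6) : (stride7 (t.drop j)).length = f := by
  rw [stride7_length (t.drop j).length _ rfl]; simp; omega

-- slices of the truncated token list only look at the first 7*f elements
theorem slice_frame (u w : List Int) (f k : Nat) (hu : u.length = 7 * f) (hk : k < f) :
    PySem.List.slice (u ++ w) (some ((k : Int) * 7)) (some (((k : Int) + 1) * 7))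
      = PySem.List.slice u (some ((k : Int) * 7)) (some (((k : Int) + 1) * 7)) := by
  have e1 : ((k : Int) * 7) = ((k * 7 : Nat) : Int) := by push_cast; ring
  have e2 : (((k : Int) + 1) * 7) = ((k * 7 : Nat) : Int) + ((7 : Nat) : Int) := by push_cast; ring
  rw [e1, e2, PySem.List.slice_natCast_add, PySem.List.slice_natCast_add]
  rw [List.drop_append_of_le_length (by omega),
      List.take_append_of_le_length (by simp; omega)]

-- the main loop invariant: A's fold over f whole frames produces exactly
-- B's three strided gathers over the normalized truncation
theorem loop_eq (f : Nat) : ∀ (u : List Int), u.length = 7 * f →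
    List.foldl (pvStep u) ([], [], []) (PySem.List.pyRange 0 (f : Int))
      = (pvL1 (u.map pvN), pvL2 (u.map pvN), pvL3 (u.map pvN)) := by
  induction f with
  | zero =>
    intro u hu
    have : u = [] := List.eq_nil_of_length_eq_zero (by omega)
    subst this
    simp [PySem.List.pyRange_one_eq_nil, pvL1, pvL2, pvL3, stride7_nil]
  | succ f ih =>
    intro u hu
    set u' := u.take (7 * f) with hu'def
    set c := u.drop (7 * f) with hcdef
    have hu' : u'.length = 7 * f := by simp [hu'def]; omega
    have hc : c.length = 7 := by simp [hcdef]; omega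
    have huc : u = u' ++ c := (List.take_append_drop _ _).symm
    rw [show ((↑(f + 1) : Int)) = (f : Int) + 1 by push_cast; ring,
        PySem.List.pyRange_one_succ_right (by positivity), List.foldl_append]
    -- the first f frames only read u'
    have hcongr : List.foldl (pvStep u) ([], [], []) (PySem.List.pyRange 0 (f : Int))
        = List.foldl (pvStep u') ([], [], []) (PySem.List.pyRange 0 (f : Int)) := by
      apply PySem.List.foldl_congr_mem
      intro acc x hx
      rw [PySem.List.mem_pyRange_one] at hx
      obtain ⟨hx0, hxf⟩ := hx
      obtain ⟨k, rfl⟩ := Int.eq_ofNat_of_zero_le hx0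
      have hk : k < f := by exact_mod_cast hxf
      unfold pvStep
      rw [huc, slice_frame u' c f k hu' hk]
    rw [hcongr, ih u' hu']
    -- destructure the last frame
    obtain ⟨a, b, c3, d, e, g, h7, hc7⟩ := exists_seven c hc
    -- evaluate the final step
    have hslice : PySem.List.slice u (some ((f : Int) * 7)) (some (((f : Int) + 1) * 7))
        = c := by
      have e1 : ((f : Int) * 7) = ((f * 7 : Nat) : Int) := by push_cast; ring
      have e2 : (((f : Int) + 1) * 7) = ((f * 7 : Nat) : Int) + ((7 : Nat) : Int) := by push_cast; ring
      rw [e1, e2, PySem.List.slice_natCast_add]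
      rw [show f * 7 = 7 * f by ring, ← hcdef]
      exact List.take_of_length_le (by omega)
    unfold pvStep
    simp only [List.foldl]
    rw [hslice, hc7]
    -- strided gathers over u = u' ++ c split into prefix ++ last column entries
    have hmap : u.map pvN = u'.map pvN ++ [pvN a, pvN b, pvN c3, pvN d, pvN e, pvN g, pvN h7] := by
      rw [huc, hc7]; simp
    have hlen : (u'.map pvN).length = 7 * f := by simp [hu']
    have hS : ∀ j : Nat, j < 7 →
        stride7 ((u.map pvN).drop j)
          = stride7 ((u'.map pvN).drop j)
            ++ stride7 (([pvN a, pvN b, pvN c3, pvN d, pvN e, pvN g, pvN h7]).drop j) := by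
      intro j hj
      rw [hmap]
      exact stride7_chunk j hj f (u'.map pvN) hlen _
    have hZlen2 : (stride7 ((u'.map pvN).drop 1)).length
        = (stride7 ((u'.map pvN).drop 4)).length := by
      rw [stride7_drop_length _ f 1 hlen (by omega) (by omega),
          stride7_drop_length _ f 4 hlen (by omega) (by omega)]
    have hZlen3a : (stride7 ((u'.map pvN).drop 2)).length
        = ((stride7 ((u'.map pvN).drop 3)).zip
            ((stride7 ((u'.map pvN).drop 5)).zip (stride7 ((u'.map pvN).drop 6)))).length := by
      simp [List.length_zip,
        stride7_drop_length _ f 2 hlen (by omega) (by omega),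
        stride7_drop_length _ f 3 hlen (by omega) (by omega),
        stride7_drop_length _ f 5 hlen (by omega) (by omega),
        stride7_drop_length _ f 6 hlen (by omega) (by omega)]
    have hZlen3b : (stride7 ((u'.map pvN).drop 3)).length
        = ((stride7 ((u'.map pvN).drop 5)).zip (stride7 ((u'.map pvN).drop 6))).length := by
      simp [List.length_zip,
        stride7_drop_length _ f 3 hlen (by omega) (by omega),
        stride7_drop_length _ f 5 hlen (by omega) (by omega),
        stride7_drop_length _ f 6 hlen (by omega) (by omega)]
    have hZlen3c : (stride7 ((u'.map pvN).drop 5)).length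
        = (stride7 ((u'.map pvN).drop 6)).length := by
      rw [stride7_drop_length _ f 5 hlen (by omega) (by omega),
          stride7_drop_length _ f 6 hlen (by omega) (by omega)]
    refine Prod.ext ?_ (Prod.ext ?_ ?_)
    · -- level 1
      show pvL1 (u'.map pvN) ++ [pvN _] = pvL1 (u.map pvN)
      unfold pvL1
      rw [show stride7 (u.map pvN) = stride7 ((u.map pvN).drop 0) by simp,
          hS 0 (by omega)]
      simp [stride7_cons, stride7_nil, PySem.List.pyGetD]
    · -- level 2
      show pvL2 (u'.map pvN) ++ _ = pvL2 (u.map pvN)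
      unfold pvL2
      rw [hS 1 (by omega), hS 4 (by omega)]
      rw [show stride7 (([pvN a, pvN b, pvN c3, pvN d, pvN e, pvN g, pvN h7]).drop 1)
            = [pvN b] by simp [stride7_cons, stride7_nil],
          show stride7 (([pvN a, pvN b, pvN c3, pvN d, pvN e, pvN g, pvN h7]).drop 4)
            = [pvN e] by simp [stride7_cons, stride7_nil]]
      rw [List.zip_append hZlen2]
      simp [PySem.List.pyGetD]
    · -- level 3
      show pvL3 (u'.map pvN) ++ _ = pvL3 (u.map pvN)
      unfold pvL3
      rw [hS 2 (by omega), hS 3 (by omega), hS 5 (by omega), hS 6 (by omega)]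
      rw [show stride7 (([pvN a, pvN b, pvN c3, pvN d, pvN e, pvN g, pvN h7]).drop 2)
            = [pvN c3] by simp [stride7_cons, stride7_nil],
          show stride7 (([pvN a, pvN b, pvN c3, pvN d, pvN e, pvN g, pvN h7]).drop 3)
            = [pvN d] by simp [stride7_cons, stride7_nil],
          show stride7 (([pvN a, pvN b, pvN c3, pvN d, pvN e, pvN g, pvN h7]).drop 5)
            = [pvN g] by simp [stride7_cons, stride7_nil],
          show stride7 (([pvN a, pvN b, pvN c3, pvN d, pvN e, pvN g, pvN h7]).drop 6)
            = [pvN h7] by simp [stride7_cons, stride7_nil]]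
      rw [List.zip_append hZlen3c, List.zip_append hZlen3b, List.zip_append hZlen3a]
      simp [PySem.List.pyGetD]

theorem floordiv_nat (m : Nat) : PySem.Int.floordiv (m : Int) 7 = ((m / 7 : Nat) : Int) := by
  simp [PySem.Int.floordiv, Int.fdiv_eq_ediv]

-- ===== VERDICT (by name: the statement is the Claim_ definition above) =====
theorem unpack_snac_py_spec : Claim_equal_unpack_snac_py := by
  intro ts _
  show unpack_snac_py ts = unpack_snac_py_alt ts
  have key := loop_eq (ts.length / 7) (ts.take (ts.length / 7 * 7)) (by simp; omega)
  unfold pvStep pvN pvL1 pvL2 pvL3 at key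
  simp only [] at key
  simp only [unpack_snac_py, unpack_snac_py_alt, floordiv_nat]
  rw [show ((ts.length / 7 : Nat) : Int) * 7 = ((ts.length / 7 * 7 : Nat) : Int) by push_cast; ring,
      PySem.List.slice_to_natCast, key]
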